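-- pv_equiv track=rewrite | github.com/Hyunta/Algorithm | Baekjoon/~2022.01.10/21314.py | getGreatest
-- ===== SOURCE A (Python) =====
-- def getGreatest(word):
--     answer = ""
--     m = 0
--     for i in range(len(word)):
--         if word[i] == "M":
--             m += 1
--         elif word[i] == "K":
--             if m:
--                 answer += str(5 * (10 ** m))
--             else:
--                 answer += "5"
--             m = 0
--     if m:
--         answer += "1" * m
--     return answer
-- ===== SOURCE B (Python) =====
-- def getGreatest(word):
--     parts = word.split('K')
--     pieces = []
--     for part in parts[:-1]:
--         c = part.count('M')
--         pieces.append(str(5 * 10 ** c) if c else '5')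
--     pieces.append('1' * parts[-1].count('M'))
--     return ''.join(pieces)
-- ===== Notes on version B (the rewrite author's own statement) =====
-- stated objective: simpler
-- what changed: A runs a character-by-character state machine with a pending-M counter flushed at each 'K'; B splits the word on 'K' once and maps each part to its piece via part.count('M'), joining the pieces.
import Mathlib
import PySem

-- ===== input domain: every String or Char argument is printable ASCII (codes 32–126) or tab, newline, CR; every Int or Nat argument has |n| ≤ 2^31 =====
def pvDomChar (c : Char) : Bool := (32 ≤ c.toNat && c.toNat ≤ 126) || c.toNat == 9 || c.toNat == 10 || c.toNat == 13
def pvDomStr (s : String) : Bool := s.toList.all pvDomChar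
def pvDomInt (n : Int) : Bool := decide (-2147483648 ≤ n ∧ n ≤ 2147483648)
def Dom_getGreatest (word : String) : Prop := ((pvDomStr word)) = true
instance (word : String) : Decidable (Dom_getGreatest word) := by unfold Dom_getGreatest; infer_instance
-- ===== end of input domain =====

-- B replaces A's single character-by-character state machine by split('K') + per-segment counting; objective: simpler decomposition.

-- ===== PORT A =====
-- A: one pass over the characters, counting 'M's, flushing a digit group at each 'K'.
def stepA (st : String × Nat) (ch : Char) : String × Nat :=
  if ch = 'M' then (st.1, st.2 + 1)
  else if ch = 'K' then
    ((if st.2 ≠ 0 then st.1 ++ PySem.Int.toStr (5 * 10 ^ st.2) else st.1 ++ "5"), 0)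
  else st

-- the trailing 'if m: answer += "1" * m'
def finishA (r : String × Nat) : String :=
  if r.2 ≠ 0 then r.1 ++ String.ofList (List.replicate r.2 '1') else r.1

def getGreatest (word : String) : String :=
  finishA (word.toList.foldl stepA ("", 0))

-- ===== PORT B =====
-- B: word.split('K') (PySem.Chars.splitOn = Python split with non-empty sep), one piece per part before the last, then '1' * count('M') for the last part.
def getGreatest_alt (word : String) : String :=
  let parts := (PySem.Chars.splitOn word.toList ['K']).map String.ofList
  let pieces := (PySem.List.slice parts none (some (-1))).map
    (fun p =>
      let c := PySem.Str.count p "M"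
      if c ≠ 0 then PySem.Int.toStr (5 * 10 ^ c) else "5")
  let pieces := pieces ++
    [String.ofList (List.replicate (PySem.Str.count ((PySem.List.pyGet? parts (-1)).getD "") "M") '1')]
  PySem.Str.join "" pieces

-- ===== PRECONDITION & SPEC =====
def Spec_getGreatest (word : String) (out : String) : Prop := out = getGreatest_alt word
instance (word : String) (out : String) : Decidable (Spec_getGreatest word out) := by unfold Spec_getGreatest; infer_instance

-- ===== CLAIM (what is proved, stated in full; the proofs are below) =====
def Claim_equal_getGreatest : Prop := ∀ (word : String), Dom_getGreatest word → Spec_getGreatest word (getGreatest word)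

-- ===== LEMMAS AND PROOFS =====

-- Python split('K') as a structural recursion.
def mySplit : List Char → List (List Char)
  | [] => [[]]
  | c :: cs => if c = 'K' then [] :: mySplit cs else (mySplit cs).modifyHead (c :: ·)

-- the digit group emitted at a 'K' preceded by m 'M's
def pieceStr (m : Nat) : String :=
  if m ≠ 0 then PySem.Int.toStr (5 * 10 ^ m) else "5"

-- A's loop in rest-of-output form: pending count m, remaining characters cs.
def gA : List Char → Nat → String
  | [], m => String.ofList (List.replicate m '1')
  | c :: cs, m =>
      if c = 'M' then gA cs (m + 1)
      else if c = 'K' then pieceStr m ++ gA cs 0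
      else gA cs m

-- B's output over the split parts, with m pending 'M's added to the first part.
def gB : List (List Char) → Nat → String
  | [], _ => ""
  | [p], m => String.ofList (List.replicate (m + p.count 'M') '1')
  | p :: q :: ps, m => pieceStr (m + p.count 'M') ++ gB (q :: ps) 0

theorem count_go_spec : ∀ (fuel : Nat) (l : List Char) (acc : Nat), l.length ≤ fuel →
    PySem.Chars.count.go ['M'] fuel l acc = acc + l.count 'M' := by
  intro fuel
  induction fuel with
  | zero => intro l acc h; cases l with
    | nil => simp [PySem.Chars.count.go]
    | cons c t => simp at h
  | succ n ih => intro l acc h; cases l with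
    | nil => simp [PySem.Chars.count.go]
    | cons c t =>
      rw [PySem.Chars.count.go]
      have hp : List.isPrefixOf ['M'] (c :: t) = (c == 'M') := by
        simp [List.isPrefixOf, BEq.comm]
      rw [hp]
      by_cases hc : c = 'M'
      · subst hc
        simp only [beq_self_eq_true, if_true, List.length_cons] at h ⊢
        rw [show List.drop ([].length + 1) ('M' :: t) = t from rfl]
        rw [ih t (acc + 1) (by omega)]
        simp; omega
      · have : (c == 'M') = false := by simp [hc]
        rw [this]
        simp only [Bool.false_eq_true, if_false, List.length_cons] at h ⊢
        rw [ih t acc (by omega)]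
        simp [hc]

theorem countM_eq (l : List Char) : PySem.Chars.count l ['M'] = l.count 'M' := by
  rw [PySem.Chars.count]
  simp only [List.isEmpty_cons, if_false, Bool.false_eq_true]
  simpa using count_go_spec l.length l 0 le_rfl

theorem split_go_spec : ∀ (fuel : Nat) (l cur : List Char) (acc : List (List Char)), l.length < fuel →
    PySem.Chars.splitOn.go ['K'] fuel l cur acc
      = acc.reverse ++ (mySplit l).modifyHead (cur.reverse ++ ·) := by
  intro fuel
  induction fuel with
  | zero => intro l cur acc h; omega
  | succ n ih => intro l cur acc h; cases l with
    | nil => simp [PySem.Chars.splitOn.go, mySplit]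
    | cons c t =>
      rw [PySem.Chars.splitOn.go]
      have hp : List.isPrefixOf ['K'] (c :: t) = (c == 'K') := by
        simp [List.isPrefixOf, BEq.comm]
      rw [hp]
      simp only [List.length_cons] at h
      by_cases hc : c = 'K'
      · subst hc
        rw [if_pos (by simp)]
        rw [show List.drop ['K'].length ('K' :: t) = t from rfl]
        rw [ih t [] (cur.reverse :: acc) (by omega)]
        simp only [mySplit, List.modifyHead, List.reverse_cons, List.append_assoc,
          List.reverse_nil, List.nil_append, List.singleton_append]
        cases hms : mySplit t <;> simp
      · rw [if_neg (by simp [hc])]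
        rw [ih t (c :: cur) acc (by omega)]
        simp only [mySplit, if_neg hc, List.reverse_cons]
        cases mySplit t <;> simp

theorem splitOn_eq (cs : List Char) : PySem.Chars.splitOn cs ['K'] = mySplit cs := by
  rw [PySem.Chars.splitOn, split_go_spec (cs.length + 1) cs [] [] (by omega)]
  cases h : mySplit cs <;> simp

theorem mySplit_ne_nil : ∀ (cs : List Char), mySplit cs ≠ [] := by
  intro cs
  induction cs with
  | nil => simp [mySplit]
  | cons c t ih =>
    simp only [mySplit]
    split_ifs
    · simp
    · cases h : mySplit t with
      | nil => exact absurd h ih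
      | cons p ps => simp

-- A's fold produces ans ++ gA cs m.
theorem foldA_eq : ∀ (cs : List Char) (ans : String) (m : Nat),
    finishA (cs.foldl stepA (ans, m)) = ans ++ gA cs m := by
  intro cs
  induction cs with
  | nil =>
    intro ans m
    simp only [List.foldl_nil, finishA, gA]
    by_cases hm : m = 0
    · subst hm; simp
    · rw [if_pos hm]
  | cons c t ih =>
    intro ans m
    simp only [List.foldl_cons]
    by_cases hM : c = 'M'
    · subst hM
      rw [show stepA (ans, m) 'M' = (ans, m + 1) from by simp [stepA]]
      rw [ih ans (m + 1)]
      simp [gA]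
    · by_cases hK : c = 'K'
      · subst hK
        rw [show stepA (ans, m) 'K'
              = ((if m ≠ 0 then ans ++ PySem.Int.toStr (5 * 10 ^ m) else ans ++ "5"), 0) from by
            simp [stepA]]
        rw [ih _ 0]
        simp only [gA, if_neg (by decide : ¬ ('K' = 'M')), pieceStr]
        split_ifs <;> rw [String.append_assoc]
      · rw [show stepA (ans, m) c = (ans, m) from by simp [stepA, hM, hK]]
        rw [ih ans m]
        simp [gA, hM, hK]

theorem gA_eq_gB : ∀ (cs : List Char) (m : Nat), gA cs m = gB (mySplit cs) m := by
  intro cs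
  induction cs with
  | nil => intro m; simp [gA, mySplit, gB]
  | cons c t ih =>
    intro m
    obtain ⟨p, ps, hps⟩ : ∃ p ps, mySplit t = p :: ps := by
      cases h : mySplit t with
      | nil => exact absurd h (mySplit_ne_nil t)
      | cons p ps => exact ⟨p, ps, rfl⟩
    by_cases hK : c = 'K'
    · subst hK
      simp only [gA, if_neg (by decide : ¬ ('K' = 'M')), mySplit, ih 0]
      rw [hps]
      cases ps <;> simp [gB]
    · simp only [mySplit, if_neg hK]
      rw [hps]
      by_cases hM : c = 'M'
      · subst hM
        simp only [gA, ih (m + 1), hps, List.modifyHead]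
        cases ps <;> simp [gB] <;> ring_nf
      · simp only [gA, if_neg hM, if_neg hK, ih m, hps, List.modifyHead]
        cases ps <;> simp [gB, hM]

theorem join_empty_cons (x : String) (l : List String) (h : l ≠ []) :
    PySem.Str.join "" (x :: l) = x ++ PySem.Str.join "" l := by
  cases l with
  | nil => exact absurd rfl h
  | cons y r =>
    rw [PySem.Str.join, PySem.Str.join,
      show ("" : String).toList = [] from rfl]
    simp only [List.map_cons]
    rw [PySem.Chars.join_cons_cons]
    simp

-- B's port, evaluated on parts = a split result, is gB parts 0.
theorem joinB_eq : ∀ (ps : List (List Char)), ps ≠ [] →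
    (PySem.Str.join ""
      (((PySem.List.slice (ps.map String.ofList) none (some (-1))).map
          (fun p =>
            let c := PySem.Str.count p "M"
            if c ≠ 0 then PySem.Int.toStr (5 * 10 ^ c) else "5"))
        ++ [String.ofList (List.replicate
              (PySem.Str.count ((PySem.List.pyGet? (ps.map String.ofList) (-1)).getD "") "M") '1')]))
      = gB ps 0 := by
  intro ps
  induction ps with
  | nil => intro h; exact absurd rfl h
  | cons p qs ih =>
    intro _
    rw [PySem.List.slice_to_neg_one, PySem.List.pyGet?_neg_one]
    cases qs with
    | nil =>
      simp [PySem.Str.join, PySem.Chars.join, List.intercalate, PySem.Str.count, countM_eq, gB]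
    | cons q rs =>
      have hrec := ih (by simp)
      rw [PySem.List.slice_to_neg_one, PySem.List.pyGet?_neg_one] at hrec
      simp only [List.map_cons] at hrec ⊢
      rw [List.dropLast_cons_of_ne_nil (by simp), List.getLast?_cons_cons, List.map_cons,
        List.cons_append, join_empty_cons _ _ (by simp), hrec]
      simp [PySem.Str.count, countM_eq, gB, pieceStr]

-- ===== VERDICT (by name: the statement is the Claim_ definition above) =====
theorem getGreatest_spec : Claim_equal_getGreatest := by
  intro word _
  unfold Spec_getGreatest getGreatest getGreatest_alt
  rw [splitOn_eq]
  rw [foldA_eq word.toList "" 0, gA_eq_gB, joinB_eq (mySplit word.toList) (mySplit_ne_nil _)]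
  simp
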